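-- pv_equiv track=rewrite | github.com/fazliddinio/cs50 | projects/08-markdown-converter/md2html.py | convert_blockquotes
-- ===== SOURCE A (Python) =====
-- def convert_blockquotes(text: str) -> str:
--     """Convert blockquotes."""
--     lines = text.split('\n')
--     result = []
--     in_quote = False
--
--     for line in lines:
--         if line.startswith('>'):
--             if not in_quote:
--                 result.append('<blockquote>')
--                 in_quote = True
--             content = line[1:].strip()
--             result.append(content)
--         else:
--             if in_quote:
--                 result.append('</blockquote>')
--                 in_quote = False
--             result.append(line)
--
--     if in_quote:
--         result.append('</blockquote>')
--
--     return '\n'.join(result)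
-- ===== SOURCE B (Python) =====
-- from itertools import groupby
--
--
-- def convert_blockquotes(text: str) -> str:
--     """Convert blockquotes (groupby over maximal runs instead of a flag)."""
--     result = []
--     for is_quote, group in groupby(text.split('\n'), key=lambda l: l.startswith('>')):
--         if is_quote:
--             result.append('<blockquote>')
--             result.extend(line[1:].strip() for line in group)
--             result.append('</blockquote>')
--         else:
--             result.extend(group)
--     return '\n'.join(result)
-- ===== Notes on version B (the rewrite author's own statement) =====
-- stated objective: idiomatic
-- what changed: Replaces the in_quote flag-and-scan with itertools.groupby over maximal runs of blockquote lines, emitting one blockquote block per run.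
import Mathlib
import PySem

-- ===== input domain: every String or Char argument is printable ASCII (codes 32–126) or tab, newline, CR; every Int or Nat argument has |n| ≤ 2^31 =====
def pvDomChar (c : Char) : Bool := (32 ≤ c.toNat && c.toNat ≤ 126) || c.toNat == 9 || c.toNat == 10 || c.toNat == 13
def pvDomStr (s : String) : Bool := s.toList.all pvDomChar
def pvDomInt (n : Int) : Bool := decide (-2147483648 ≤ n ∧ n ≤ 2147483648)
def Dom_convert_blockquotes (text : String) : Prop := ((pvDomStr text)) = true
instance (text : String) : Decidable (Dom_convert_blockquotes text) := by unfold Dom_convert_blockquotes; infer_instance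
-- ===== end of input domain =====

-- B replaces A's in_quote flag scan with grouping the lines into maximal runs of
-- blockquote lines and emitting one blockquote block per run (idiomatic, same cost).


-- ===== PORT A =====
-- one step of A's for-loop; state = (result, in_quote)
def bqStepA (st : List String × Bool) (line : String) : List String × Bool :=
  if PySem.Str.startswith line ">" then
    let st1 := if !st.2 then (st.1 ++ ["<blockquote>"], true) else st
    let content := PySem.Str.strip (PySem.Str.slice line (some 1) none)  -- line[1:].strip()
    (st1.1 ++ [content], st1.2)
  else
    let st1 := if st.2 then (st.1 ++ ["</blockquote>"], false) else st
    (st1.1 ++ [line], st1.2)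

def convert_blockquotes (text : String) : String :=
  let lines := ((PySem.Str.split? text "\n").getD [])
  let fin := lines.foldl bqStepA ([], false)
  let result := if fin.2 then fin.1 ++ ["</blockquote>"] else fin.1
  PySem.Str.join "\n" result

-- ===== PORT B =====
def bqIsQ (l : String) : Bool := PySem.Str.startswith l ">"

def bqContent (line : String) : String := PySem.Str.strip (PySem.Str.slice line (some 1) none)

-- groupby(lines, key=startswith '>'): each call consumes one maximal run (one group)
def bqGroups : List String → List String
  | [] => []
  | l :: ls =>
    if bqIsQ l then
      "<blockquote>" :: bqContent l :: (ls.takeWhile bqIsQ).map bqContent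
        ++ ["</blockquote>"] ++ bqGroups (ls.dropWhile bqIsQ)
    else
      l :: ls.takeWhile (fun x => !bqIsQ x) ++ bqGroups (ls.dropWhile (fun x => !bqIsQ x))
  termination_by ls => ls.length
  decreasing_by
    · exact Nat.lt_succ_of_le (List.length_dropWhile_le _ _)
    · exact Nat.lt_succ_of_le (List.length_dropWhile_le _ _)

def convert_blockquotes_alt (text : String) : String :=
  PySem.Str.join "\n" (bqGroups (((PySem.Str.split? text "\n").getD [])))

-- ===== PRECONDITION & SPEC =====
def Spec_convert_blockquotes (text : String) (out : String) : Prop := out = convert_blockquotes_alt text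
instance (text : String) (out : String) : Decidable (Spec_convert_blockquotes text out) := by unfold Spec_convert_blockquotes; infer_instance

-- ===== CLAIM (what is proved, stated in full; the proofs are below) =====
def Claim_equal_convert_blockquotes : Prop := ∀ (text : String), Dom_convert_blockquotes text → Spec_convert_blockquotes text (convert_blockquotes text)

-- ===== LEMMAS AND PROOFS =====

-- the final 'if in_quote then append </blockquote>' of A
def bqFin (st : List String × Bool) : List String :=
  if st.2 then st.1 ++ ["</blockquote>"] else st.1

-- a false-run prefix passes through bqGroups unchanged
lemma bqGroups_skip_false (ls : List String) :
    ls.takeWhile (fun x => !bqIsQ x) ++ bqGroups (ls.dropWhile (fun x => !bqIsQ x)) = bqGroups ls := by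
  induction ls with
  | nil => simp [bqGroups]
  | cons l ls ih =>
    by_cases h : bqIsQ l
    · simp [h]
    · have h' : bqIsQ l = false := by simpa using h
      rw [bqGroups]
      simp [h', ih]

lemma bqGroups_cons_false {l : String} {ls : List String} (h : bqIsQ l = false) :
    bqGroups (l :: ls) = l :: bqGroups ls := by
  rw [bqGroups]
  simp only [h, Bool.false_eq_true, if_false]
  exact congrArg (List.cons l) (bqGroups_skip_false ls)

-- A's loop from either flag state, versus B's group emission
lemma bqLoop_eq (ls : List String) : ∀ acc : List String,
    (bqFin (ls.foldl bqStepA (acc, false)) = acc ++ bqGroups ls) ∧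
    (bqFin (ls.foldl bqStepA (acc, true)) =
      acc ++ (ls.takeWhile bqIsQ).map bqContent ++ ["</blockquote>"] ++ bqGroups (ls.dropWhile bqIsQ)) := by
  induction ls with
  | nil => intro acc; simp [bqFin, bqGroups]
  | cons l ls ih =>
    intro acc
    by_cases h : bqIsQ l
    · have hb : PySem.Chars.startswith l.toList ['>'] = true := by simpa [bqIsQ] using h
      constructor
      · have e : bqStepA (acc, false) l = (acc ++ ["<blockquote>"] ++ [bqContent l], true) := by
          simp [bqStepA, hb, bqContent]
        simp only [List.foldl_cons, e]
        rw [(ih (acc ++ ["<blockquote>"] ++ [bqContent l])).2, bqGroups]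
        simp [h]
      · have e : bqStepA (acc, true) l = (acc ++ [bqContent l], true) := by
          simp [bqStepA, hb, bqContent]
        simp only [List.foldl_cons, e]
        rw [(ih (acc ++ [bqContent l])).2]
        simp [h]
    · have hb : PySem.Chars.startswith l.toList ['>'] = false := by simpa [bqIsQ] using h
      have h' : bqIsQ l = false := by simpa using h
      constructor
      · have e : bqStepA (acc, false) l = (acc ++ [l], false) := by simp [bqStepA, hb]
        simp only [List.foldl_cons, e]
        rw [(ih (acc ++ [l])).1, bqGroups_cons_false h']
        simp
      · have e : bqStepA (acc, true) l = (acc ++ ["</blockquote>"] ++ [l], false) := by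
          simp [bqStepA, hb]
        simp only [List.foldl_cons, e]
        rw [(ih (acc ++ ["</blockquote>"] ++ [l])).1]
        simp [h', bqGroups_cons_false h']

-- ===== VERDICT (by name: the statement is the Claim_ definition above) =====
theorem convert_blockquotes_spec : Claim_equal_convert_blockquotes := by
  intro text _
  show _ = _
  unfold convert_blockquotes convert_blockquotes_alt
  have h := (bqLoop_eq (((PySem.Str.split? text "\n").getD [])) []).1
  simp only [List.nil_append] at h
  simp only [← h, bqFin]
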